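-- pv_equiv track=rewrite | github.com/ItsAugustine04/ML-Hackathon-Hangman | hangman_hmm.py | _filter_matching_words
-- ===== SOURCE A (Python) =====
-- def _filter_matching_words(words, masked_word, guessed_letters):
--     """Filter words that match the current pattern"""
--     matching = []
--     for word in words:
--         if len(word) != len(masked_word):
--             continue
--
--         match = True
--         for i, char in enumerate(masked_word):
--             if char != '_':
--                 if word[i] != char:
--                     match = False
--                     break
--             elif word[i] in guessed_letters:
--                 match = False
--                 break
--
--         if match:
--             matching.append(word)
--
--     return matching
-- ===== SOURCE B (Python) =====
-- def _filter_matching_words(words, masked_word, guessed_letters):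
--     """Filter words that match the current pattern (position-major staged filtering)."""
--     candidates = [w for w in words if len(w) == len(masked_word)]
--     for i, char in enumerate(masked_word):
--         if char != '_':
--             candidates = [w for w in candidates if w[i] == char]
--         else:
--             candidates = [w for w in candidates if w[i] not in guessed_letters]
--     return candidates
-- ===== Notes on version B (the rewrite author's own statement) =====
-- stated objective: alternative
-- what changed: Inverts the loop nesting: instead of A's word-major scan with a per-word inner character loop and break flag, B filters the candidate list position by position (length pass first, then one narrowing pass per mask position), which is correct because the per-position constraints are an order-independent conjunction and list filtering preserves order.
import Mathlib
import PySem

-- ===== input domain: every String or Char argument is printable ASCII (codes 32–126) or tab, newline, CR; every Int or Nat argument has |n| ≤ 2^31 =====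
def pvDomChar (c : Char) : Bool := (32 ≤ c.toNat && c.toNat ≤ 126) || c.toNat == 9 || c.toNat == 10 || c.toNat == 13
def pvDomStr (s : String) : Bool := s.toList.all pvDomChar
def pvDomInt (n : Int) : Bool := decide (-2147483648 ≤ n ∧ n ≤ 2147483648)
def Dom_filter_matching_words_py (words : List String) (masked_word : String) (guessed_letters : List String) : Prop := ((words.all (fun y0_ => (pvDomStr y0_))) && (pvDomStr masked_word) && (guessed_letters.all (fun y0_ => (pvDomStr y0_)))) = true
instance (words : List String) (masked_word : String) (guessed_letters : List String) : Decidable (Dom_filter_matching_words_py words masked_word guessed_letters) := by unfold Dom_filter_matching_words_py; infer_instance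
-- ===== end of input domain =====

-- B inverts the loop nesting: a length pass, then one narrowing filter pass per mask position (alternative decomposition, same cost).

-- ===== PORT A =====
-- inner 'for i, char in enumerate(masked_word)' loop with its break/flag, as structural recursion
def pvCheckA (word : List Char) (guessed : List String) : List (Int × Char) → Bool
  | [] => true
  | (i, char) :: rest =>
    if char ≠ '_' then
      if PySem.List.pyGetD word i ' ' ≠ char then false
      else pvCheckA word guessed rest
    else if guessed.contains (String.ofList [PySem.List.pyGetD word i ' ']) then false
    else pvCheckA word guessed rest

def filter_matching_words_py (words : List String) (masked_word : String) (guessed_letters : List String) : List String :=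
  words.foldl (fun matching word =>
    if word.toList.length ≠ masked_word.toList.length then matching
    else if pvCheckA word.toList guessed_letters (PySem.List.enumerate masked_word.toList 0) then
      matching ++ [word]
    else matching) []

-- ===== PORT B =====
-- staged filtering: candidates of the right length, then one filter pass per (i, char) of the mask
def filter_matching_words_py_alt (words : List String) (masked_word : String) (guessed_letters : List String) : List String :=
  let candidates := words.filter (fun w => w.toList.length == masked_word.toList.length)
  (PySem.List.enumerate masked_word.toList 0).foldl
    (fun cand p =>
      if p.2 ≠ '_' then
        cand.filter (fun w => PySem.List.pyGetD w.toList p.1 ' ' == p.2)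
      else
        cand.filter (fun w => !(guessed_letters.contains (String.ofList [PySem.List.pyGetD w.toList p.1 ' '])))) candidates

-- ===== PRECONDITION & SPEC =====
def Spec_filter_matching_words_py (words : List String) (masked_word : String) (guessed_letters : List String) (out : List String) : Prop := out = filter_matching_words_py_alt words masked_word guessed_letters
instance (words : List String) (masked_word : String) (guessed_letters : List String) (out : List String) : Decidable (Spec_filter_matching_words_py words masked_word guessed_letters out) := by unfold Spec_filter_matching_words_py; infer_instance

-- ===== CLAIM (what is proved, stated in full; the proofs are below) =====
def Claim_equal_filter_matching_words_py : Prop := ∀ (words : List String) (masked_word : String) (guessed_letters : List String), Dom_filter_matching_words_py words masked_word guessed_letters → Spec_filter_matching_words_py words masked_word guessed_letters (filter_matching_words_py words masked_word guessed_letters)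

-- ===== LEMMAS AND PROOFS =====

-- the per-position predicate B applies in its pass for (i, char)
def pvG (guessed : List String) (p : Int × Char) (w : String) : Bool :=
  if p.2 ≠ '_' then PySem.List.pyGetD w.toList p.1 ' ' == p.2
  else !(guessed.contains (String.ofList [PySem.List.pyGetD w.toList p.1 ' ']))

-- B's step is a single filter by pvG
lemma step_eq_filter (guessed : List String) (cand : List String) (p : Int × Char) :
    (if p.2 ≠ '_' then
        cand.filter (fun w => PySem.List.pyGetD w.toList p.1 ' ' == p.2)
      else
        cand.filter (fun w => !(guessed.contains (String.ofList [PySem.List.pyGetD w.toList p.1 ' '])))) =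
    cand.filter (pvG guessed p) := by
  by_cases h : p.2 ≠ '_'
  · rw [if_pos h]; congr 1; funext w; rw [pvG, if_pos h]
  · rw [if_neg h]; congr 1; funext w; rw [pvG, if_neg h]

-- chaining B's filter passes = one filter by the conjunction of all per-position predicates
lemma foldl_filter_eq (guessed : List String) :
    ∀ (ps : List (Int × Char)) (acc : List String),
    ps.foldl (fun cand p => cand.filter (pvG guessed p)) acc =
      acc.filter (fun w => ps.all (fun p => pvG guessed p w)) := by
  intro ps
  induction ps with
  | nil => intro acc; simp
  | cons p rest ih =>
    intro acc
    simp only [List.foldl_cons, ih, List.filter_filter, List.all_cons]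
    congr 1
    funext w
    rw [Bool.and_comm]

-- A's break/flag inner loop computes exactly the conjunction of the per-position predicates
lemma pvCheckA_eq_all (guessed : List String) (w : String) :
    ∀ (ps : List (Int × Char)),
    pvCheckA w.toList guessed ps = ps.all (fun p => pvG guessed p w) := by
  intro ps
  induction ps with
  | nil => simp [pvCheckA]
  | cons p rest ih =>
    obtain ⟨i, c⟩ := p
    by_cases hc : c ≠ '_'
    · by_cases hw : PySem.List.pyGetD w.toList i ' ' ≠ c
      · simp [pvCheckA, pvG, hc, hw]
      · simp only [not_not] at hw
        simp [pvCheckA, pvG, hc, hw, ih]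
    · simp only [not_not] at hc
      by_cases hg : String.ofList [PySem.List.pyGetD w.toList i ' '] ∈ guessed
      · simp [pvCheckA, pvG, hc, hg]
      · simp [pvCheckA, pvG, hc, hg, ih]

-- A's outer foldl with append-accumulator is a filter
lemma foldlA_eq_filter (masked_word : String) (guessed_letters : List String) :
    ∀ (words : List String) (acc : List String),
    words.foldl (fun matching word =>
      if word.toList.length ≠ masked_word.toList.length then matching
      else if pvCheckA word.toList guessed_letters (PySem.List.enumerate masked_word.toList 0) then
        matching ++ [word]
      else matching) acc =
    acc ++ words.filter (fun word =>
      (word.toList.length == masked_word.toList.length) &&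
      pvCheckA word.toList guessed_letters (PySem.List.enumerate masked_word.toList 0)) := by
  intro words
  induction words with
  | nil => intro acc; simp
  | cons w ws ih =>
    intro acc
    simp only [List.foldl_cons, List.filter_cons, ih]
    by_cases hlen : w.toList.length = masked_word.toList.length
    · have hbeq : (w.toList.length == masked_word.toList.length) = true := by simp [hlen]
      rw [if_neg (by simp [hlen])]
      simp only [hbeq, Bool.true_and]
      cases hchk : pvCheckA w.toList guessed_letters (PySem.List.enumerate masked_word.toList 0) with
      | true => simp
      | false => simp
    · have hbeq : (w.toList.length == masked_word.toList.length) = false := by simpa using hlen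
      rw [if_pos hlen]
      simp only [hbeq, Bool.false_and, Bool.false_eq_true, if_false]

-- ===== VERDICT (by name: the statement is the Claim_ definition above) =====
theorem filter_matching_words_py_spec : Claim_equal_filter_matching_words_py := by
  intro words masked_word guessed_letters _
  unfold Spec_filter_matching_words_py filter_matching_words_py filter_matching_words_py_alt
  rw [List.foldl_ext _ (fun cand p => List.filter (pvG guessed_letters p) cand) _
        (fun cand p _ => step_eq_filter guessed_letters cand p),
      foldl_filter_eq, List.filter_filter,
      foldlA_eq_filter masked_word guessed_letters words []]
  simp only [List.nil_append]
  congr 1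
  funext w
  rw [pvCheckA_eq_all, Bool.and_comm]
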